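-- pv_equiv track=rewrite | github.com/badnewsgoonies-dot/vale-village-v3 | tools/vision/sprite_gen.py | parse_enemy_manifest
-- ===== SOURCE A (Python) =====
-- def parse_enemy_manifest(content):
--     """Parse enemy TOML manifest."""
--     entries = []
--     current = {}
--     for line in content.split("\n"):
--         line = line.strip()
--         if line.startswith("[entities."):
--             if current:
--                 entries.append(current)
--             eid = line.split("[entities.")[1].rstrip("]")
--             current = {"id": eid}
--         elif "=" in line and current:
--             key, val = line.split("=", 1)
--             key = key.strip()
--             val = val.strip().strip('"')
--             if key == "display_name":
--                 current["name"] = val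
--             elif key == "sprite_idle":
--                 current["sprite_path"] = val
--                 current["sprite_type"] = "idle"
--             elif key == "data":
--                 if "#" in val:
--                     current["data_ref"] = val.split("#")[1]
--     if current:
--         entries.append(current)
--     return entries
-- ===== SOURCE B (Python) =====
-- def _parse_block(block):
--     """Build the entry dict for one '[entities.<id>]' block (header + body lines)."""
--     entry = {"id": block[0].split("[entities.")[1].rstrip("]")}
--     for line in block[1:]:
--         if "=" in line:
--             key, val = line.split("=", 1)
--             key = key.strip()
--             val = val.strip().strip('"')
--             if key == "display_name":
--                 entry["name"] = val
--             elif key == "sprite_idle":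
--                 entry["sprite_path"] = val
--                 entry["sprite_type"] = "idle"
--             elif key == "data":
--                 if "#" in val:
--                     entry["data_ref"] = val.split("#")[1]
--     return entry
--
--
-- def parse_enemy_manifest(content):
--     """Parse enemy TOML manifest."""
--     lines = [l.strip() for l in content.split("\n")]
--     n = len(lines)
--     i = 0
--     while i < n and not lines[i].startswith("[entities."):
--         i += 1
--     blocks = []
--     while i < n:
--         j = i + 1
--         while j < n and not lines[j].startswith("[entities."):
--             j += 1
--         blocks.append(lines[i:j])
--         i = j
--     return [_parse_block(b) for b in blocks]
-- ===== Notes on version B (the rewrite author's own statement) =====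
-- stated objective: alternative
-- what changed: Replaces A's single-pass loop with a mutable current-dict accumulator by a two-phase decomposition: first partition the stripped lines into entity-header blocks (dropping pre-header lines, cutting at each header), then map each block independently through a per-block parser.
import Mathlib
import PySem

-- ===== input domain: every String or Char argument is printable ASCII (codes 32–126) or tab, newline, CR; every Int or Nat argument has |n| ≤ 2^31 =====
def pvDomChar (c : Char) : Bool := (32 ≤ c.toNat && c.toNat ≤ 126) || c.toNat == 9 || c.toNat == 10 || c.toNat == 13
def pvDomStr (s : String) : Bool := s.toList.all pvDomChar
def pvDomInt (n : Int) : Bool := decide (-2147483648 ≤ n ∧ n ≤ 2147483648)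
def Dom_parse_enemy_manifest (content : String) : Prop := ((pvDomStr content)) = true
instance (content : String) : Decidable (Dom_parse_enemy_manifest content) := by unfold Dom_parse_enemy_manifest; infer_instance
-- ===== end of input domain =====

-- B re-implements the single accumulator loop as partition-into-blocks + per-block parse (same values; objective: alternative decomposition).

-- ===== PORT A =====
-- s.rstrip("]") — hand port (PySem has no rstrip-with-chars): drop every trailing ']'; exact.
def pvRstripRB (s : String) : String :=
  String.ofList ((s.toList.reverse.dropWhile (fun c => c == ']')).reverse)

-- line.split("[entities.")[1].rstrip("]")  (the [1] always exists when the header test held)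
def pvHeaderId (line : String) : String :=
  pvRstripRB (PySem.List.pyGetD ((PySem.Str.split? line "[entities.").getD []) 1 "")

-- the loop body of A after `line = line.strip()`
def pvStepS (st : List (PySem.Dict String String) × PySem.Dict String String) (line : String) :
    List (PySem.Dict String String) × PySem.Dict String String :=
  if PySem.Str.startswith line "[entities." then
    ((if st.2.items.isEmpty then st.1 else st.1 ++ [st.2]),
     PySem.Dict.empty.insert "id" (pvHeaderId line))
  else if PySem.Str.isIn "=" line && !st.2.items.isEmpty then
    let parts := (PySem.Str.splitMax? line "=" 1).getD []
    let key := PySem.Str.strip (PySem.List.pyGetD parts 0 "")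
    let val := PySem.Str.stripChars (PySem.Str.strip (PySem.List.pyGetD parts 1 "")) "\""
    if key = "display_name" then (st.1, st.2.insert "name" val)
    else if key = "sprite_idle" then (st.1, (st.2.insert "sprite_path" val).insert "sprite_type" "idle")
    else if key = "data" then
      if PySem.Str.isIn "#" val then
        (st.1, st.2.insert "data_ref" (PySem.List.pyGetD ((PySem.Str.split? val "#").getD []) 1 ""))
      else (st.1, st.2)
    else (st.1, st.2)
  else st

-- A's loop body: `line = line.strip()` then the branches
def pvStepA (st : List (PySem.Dict String String) × PySem.Dict String String) (rawline : String) :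
    List (PySem.Dict String String) × PySem.Dict String String :=
  pvStepS st (PySem.Str.strip rawline)

-- `if current: entries.append(current); return entries` (dicts rendered as item lists)
def pvFinish (st : List (PySem.Dict String String) × PySem.Dict String String) :
    List (List (String × String)) :=
  (if st.2.items.isEmpty then st.1 else st.1 ++ [st.2]).map PySem.Dict.items

def parse_enemy_manifest (content : String) : List (List (String × String)) :=
  pvFinish (((PySem.Str.split? content "\n").getD []).foldl pvStepA ([], PySem.Dict.empty))

-- ===== PORT B =====
def pvIsHeader (l : String) : Bool := PySem.Str.startswith l "[entities."

-- body of `if "=" in line:` in _parse_block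
def pvKV (entry : PySem.Dict String String) (line : String) : PySem.Dict String String :=
  if PySem.Str.isIn "=" line then
    let parts := (PySem.Str.splitMax? line "=" 1).getD []
    let key := PySem.Str.strip (PySem.List.pyGetD parts 0 "")
    let val := PySem.Str.stripChars (PySem.Str.strip (PySem.List.pyGetD parts 1 "")) "\""
    if key = "display_name" then entry.insert "name" val
    else if key = "sprite_idle" then (entry.insert "sprite_path" val).insert "sprite_type" "idle"
    else if key = "data" then
      if PySem.Str.isIn "#" val then
        entry.insert "data_ref" (PySem.List.pyGetD ((PySem.Str.split? val "#").getD []) 1 "")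
      else entry
    else entry
  else entry

def pvParseBlock (block : List String) : List (String × String) :=
  ((PySem.List.slice block (some 1) none).foldl pvKV
    (PySem.Dict.empty.insert "id" (pvHeaderId (PySem.List.pyGetD block 0 "")))).items

-- the `while i < n:` loop: each block is a header plus the lines up to the next header (lines[i:j])
def pvSplitBlocks : List String → List (List String)
  | [] => []
  | h :: rest =>
      (h :: rest.takeWhile (fun l => !pvIsHeader l)) ::
        pvSplitBlocks (rest.dropWhile (fun l => !pvIsHeader l))
termination_by l => l.length
decreasing_by simpa using Nat.lt_succ_of_le (List.length_dropWhile_le _ rest)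

def parse_enemy_manifest_alt (content : String) : List (List (String × String)) :=
  let lines := ((PySem.Str.split? content "\n").getD []).map PySem.Str.strip
  (pvSplitBlocks (lines.dropWhile (fun l => !pvIsHeader l))).map pvParseBlock

-- ===== PRECONDITION & SPEC =====
def Spec_parse_enemy_manifest (content : String) (out : List (List (String × String))) : Prop := out = parse_enemy_manifest_alt content
instance (content : String) (out : List (List (String × String))) : Decidable (Spec_parse_enemy_manifest content out) := by unfold Spec_parse_enemy_manifest; infer_instance

-- ===== CLAIM (what is proved, stated in full; the proofs are below) =====
def Claim_equal_parse_enemy_manifest : Prop := ∀ (content : String), Dom_parse_enemy_manifest content → Spec_parse_enemy_manifest content (parse_enemy_manifest content)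

-- ===== LEMMAS AND PROOFS =====

theorem pv_insert_items_ne_nil (d : PySem.Dict String String) (k v : String) :
    (d.insert k v).items ≠ [] :=
  List.ne_nil_of_mem (PySem.Dict.mem_items_insert_self d k v)

set_option maxHeartbeats 1000000 in
theorem pvKV_ne_nil (d : PySem.Dict String String) (l : String) (h : d.items ≠ []) :
    (pvKV d l).items ≠ [] := by
  unfold pvKV
  by_cases he : PySem.Str.isIn "=" l = true
  · simp only [he, if_true]
    split_ifs <;> first | exact pv_insert_items_ne_nil _ _ _ | exact h
  · simp only [Bool.not_eq_true] at he
    simp only [he, Bool.false_eq_true, if_false]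
    exact h

theorem pv_stepS_header (st : List (PySem.Dict String String) × PySem.Dict String String)
    (l : String) (hh : pvIsHeader l = true) :
    pvStepS st l = ((if st.2.items.isEmpty then st.1 else st.1 ++ [st.2]),
      PySem.Dict.empty.insert "id" (pvHeaderId l)) := by
  unfold pvStepS
  simp [pvIsHeader] at hh
  simp [hh]

set_option maxHeartbeats 1000000 in
theorem pv_stepS_kv (es : List (PySem.Dict String String)) (cur : PySem.Dict String String)
    (l : String) (hh : pvIsHeader l = false) (hne : cur.items ≠ []) :
    pvStepS (es, cur) l = (es, pvKV cur l) := by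
  unfold pvStepS pvKV
  simp only [pvIsHeader] at hh
  have h2 : cur.items.isEmpty = false := by simpa [List.isEmpty_iff] using hne
  simp only [PySem.Str.startswith_eq] at hh ⊢
  simp only [hh, Bool.false_eq_true, if_false, h2, Bool.not_false, Bool.and_true]
  split_ifs <;> rfl

theorem pv_stepS_skip (es : List (PySem.Dict String String)) (cur : PySem.Dict String String)
    (l : String) (hh : pvIsHeader l = false) (hcur : cur.items = []) :
    pvStepS (es, cur) l = (es, cur) := by
  unfold pvStepS
  simp [pvIsHeader] at hh
  simp [hh, hcur]

theorem pv_slice_one (x : String) (xs : List String) :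
    PySem.List.slice (x :: xs) (some 1) none = xs := by
  simp [PySem.List.slice]

theorem pv_phase1 : ∀ (ls : List String) (es : List (PySem.Dict String String))
    (cur : PySem.Dict String String), cur.items ≠ [] →
    pvFinish (ls.foldl pvStepS (es, cur)) =
      es.map PySem.Dict.items ++
        ((ls.takeWhile (fun l => !pvIsHeader l)).foldl pvKV cur).items ::
          (pvSplitBlocks (ls.dropWhile (fun l => !pvIsHeader l))).map pvParseBlock := by
  intro ls
  induction ls with
  | nil =>
      intro es cur hne
      have h2 : cur.items.isEmpty = false := by simpa [List.isEmpty_iff] using hne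
      simp [pvFinish, pvSplitBlocks, h2]
  | cons l t ih =>
      intro es cur hne
      have h2 : cur.items.isEmpty = false := by simpa [List.isEmpty_iff] using hne
      by_cases hh : pvIsHeader l = true
      · rw [List.foldl_cons, pv_stepS_header (es, cur) l hh]
        simp only [h2, Bool.false_eq_true, if_false]
        rw [ih (es ++ [cur]) _ (pv_insert_items_ne_nil _ _ _)]
        have hh' : (!pvIsHeader l) = false := by simp [hh]
        simp [hh', pvSplitBlocks, pvParseBlock, pv_slice_one]
      · have hh0 : pvIsHeader l = false := by simpa using hh
        rw [List.foldl_cons, pv_stepS_kv es cur l hh0 hne]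
        rw [ih es _ (pvKV_ne_nil _ _ hne)]
        have hh' : (!pvIsHeader l) = true := by simp [hh0]
        simp [hh']

theorem pv_phase0 : ∀ (ls : List String),
    pvFinish (ls.foldl pvStepS ([], PySem.Dict.empty)) =
      (pvSplitBlocks (ls.dropWhile (fun l => !pvIsHeader l))).map pvParseBlock := by
  intro ls
  induction ls with
  | nil => simp [pvFinish, pvSplitBlocks, PySem.Dict.empty]
  | cons l t ih =>
      by_cases hh : pvIsHeader l = true
      · rw [List.foldl_cons, pv_stepS_header ([], PySem.Dict.empty) l hh]
        rw [if_pos (show (PySem.Dict.empty : PySem.Dict String String).items.isEmpty = true from rfl)]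
        rw [pv_phase1 t [] _ (pv_insert_items_ne_nil _ _ _)]
        have hh' : (!pvIsHeader l) = false := by simp [hh]
        simp [hh', pvSplitBlocks, pvParseBlock, pv_slice_one]
      · have hh0 : pvIsHeader l = false := by simpa using hh
        rw [List.foldl_cons, pv_stepS_skip [] PySem.Dict.empty l hh0 (by simp [PySem.Dict.empty])]
        have hh' : (!pvIsHeader l) = true := by simp [hh0]
        simpa [hh', List.dropWhile_cons] using ih

-- ===== VERDICT (by name: the statement is the Claim_ definition above) =====
theorem parse_enemy_manifest_spec : Claim_equal_parse_enemy_manifest := by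
  intro content _
  unfold Spec_parse_enemy_manifest parse_enemy_manifest parse_enemy_manifest_alt
  rw [show pvStepA = (fun st raw => pvStepS st (PySem.Str.strip raw)) from rfl,
      ← List.foldl_map]
  exact pv_phase0 _
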